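-- pv_equiv track=rewrite | github.com/Fondamenti18/fondamenti-di-programmazione | students/1802989/homework04/program01.py | level
-- ===== SOURCE A (Python) =====
-- def level(file, node, k, diz):
--     'Funzione ricorsiva per dizionario_livelli'
--     nodo = str(node+1)
--     if nodo not in diz and file[k]:
--         diz[nodo] = []
--     for el in file[k]:
--         diz[nodo].append(el)
--         level(file, node+1, el, diz)
--     return diz
-- ===== SOURCE B (Python) =====
-- def level(file, node, k, diz):
--     'Level-by-level (BFS) collection: per-level lists equal DFS pre-order per level'
--     frontier = [k]
--     d = node
--     while frontier:
--         nxt = []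
--         for x in frontier:
--             nxt.extend(file[x])
--         if nxt:
--             key = str(d + 1)
--             if key not in diz:
--                 diz[key] = []
--             diz[key].extend(nxt)
--         frontier = nxt
--         d += 1
--     return diz
-- ===== Notes on version B (the rewrite author's own statement) =====
-- stated objective: alternative
-- what changed: Replaces A's depth-first recursion (append one child at a time, recurse immediately) with an iterative breadth-first frontier loop that builds each level's concatenated child list once and extends diz[str(d+1)] in a single batch per level; per-level DFS pre-order provably equals BFS level order, so the returned dict (values and key insertion order) is identical.
import Mathlib
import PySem

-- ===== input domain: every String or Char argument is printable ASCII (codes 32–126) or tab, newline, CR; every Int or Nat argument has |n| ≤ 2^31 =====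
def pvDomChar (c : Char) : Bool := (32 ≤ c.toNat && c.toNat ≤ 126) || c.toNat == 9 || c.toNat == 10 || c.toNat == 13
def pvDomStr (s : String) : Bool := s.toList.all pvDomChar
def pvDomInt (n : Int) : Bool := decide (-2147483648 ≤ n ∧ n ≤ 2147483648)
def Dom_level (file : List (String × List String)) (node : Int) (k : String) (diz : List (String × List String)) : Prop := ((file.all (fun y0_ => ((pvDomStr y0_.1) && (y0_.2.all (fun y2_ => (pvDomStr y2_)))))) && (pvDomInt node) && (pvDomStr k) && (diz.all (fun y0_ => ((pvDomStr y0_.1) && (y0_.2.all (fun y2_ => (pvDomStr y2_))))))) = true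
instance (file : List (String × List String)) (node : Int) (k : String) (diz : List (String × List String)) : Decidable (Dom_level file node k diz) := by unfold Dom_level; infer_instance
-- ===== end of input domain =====

-- B re-implements A's recursive DFS as an iterative level-by-level (BFS) frontier loop; the two
-- ports are proved to agree. Both Pythons mutate `diz` in place and (on Pre_level inputs) leave
-- it in the same final state; the theorem is about the returned dict.

-- ===== PORT A =====
-- A's recursion depth depends on the input graph, so the port carries fuel: file.length + 2 is
-- enough for every input Pre_level admits; `none` marks where the Python raises (fuel exhaustion
-- = unbounded recursion, missing key = KeyError), and Pre_level excludes those inputs.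
def levelGo (file : PySem.Dict String (List String)) :
    Nat → Int → String → PySem.Dict String (List String) →
    Option (PySem.Dict String (List String))
  | 0, _, _, _ => none
  | fuel+1, node, k, diz =>
    match file.get? k with
    | none => none            -- file[k] raises KeyError
    | some cs =>
      let nodo := PySem.Int.toStr (node + 1)
      -- if nodo not in diz and file[k]: diz[nodo] = []
      let diz1 := if diz.contains nodo = false ∧ cs ≠ [] then diz.insert nodo [] else diz
      -- for el in file[k]: diz[nodo].append(el); level(file, node+1, el, diz)
      cs.foldlM (fun z el =>
        levelGo file fuel (node+1) el (z.modify nodo [] (· ++ [el]))) diz1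

def level (file : List (String × List String)) (node : Int) (k : String) (diz : List (String × List String)) : List (String × List String) :=
  ((levelGo ⟨file⟩ (file.length + 2) node k ⟨diz⟩).getD ⟨diz⟩).items

-- ===== PORT B =====
-- nxt = []; for x in frontier: nxt.extend(file[x])   (none = KeyError)
def gatherNext (file : PySem.Dict String (List String)) (frontier : List String) :
    Option (List String) :=
  frontier.foldlM (fun acc x => (file.get? x).map (fun cs => acc ++ cs)) []

-- if nxt: key = str(d+1); if key not in diz: diz[key] = []; diz[key].extend(nxt)
def bfsStep (diz : PySem.Dict String (List String)) (key : String) (nxt : List String) :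
    PySem.Dict String (List String) :=
  if nxt ≠ [] then
    (if diz.contains key = false then diz.insert key [] else diz).modify key [] (· ++ nxt)
  else diz

-- while frontier: …   (fueled like port A, with the same fuel)
def bfsGo (file : PySem.Dict String (List String)) :
    Nat → Int → List String → PySem.Dict String (List String) →
    Option (PySem.Dict String (List String))
  | fuel, d, F, diz =>
    if F = [] then some diz
    else match fuel with
      | 0 => none
      | fuel+1 =>
        match gatherNext file F with
        | none => none
        | some nxt => bfsGo file fuel (d+1) nxt (bfsStep diz (PySem.Int.toStr (d+1)) nxt)

def level_alt (file : List (String × List String)) (node : Int) (k : String) (diz : List (String × List String)) : List (String × List String) :=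
  ((bfsGo ⟨file⟩ (file.length + 2) node [k] ⟨diz⟩).getD ⟨diz⟩).items

-- ===== PRECONDITION & SPEC =====
-- adjacency of the key graph: children of x, [] where x is not a key
def pvAdj (file : List (String × List String)) (x : String) : List String :=
  ((PySem.Dict.mk file).get? x).getD []
def pvStepSet (file : List (String × List String)) (S : List String) : List String :=
  (S ++ S.flatMap (pvAdj file)).dedup
-- all nodes reachable from S (file.length + 1 closure rounds always reach the fixpoint, since
-- only keys of file expand and a shortest path repeats no key)
def pvReachFrom (file : List (String × List String)) (S : List String) : List String :=
  (pvStepSet file)^[file.length + 1] S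
-- Pre_level excludes exactly: inputs where A raises (KeyError on a reachable node that is not a
-- key of file, or unbounded recursion on a cycle reachable from k), and association lists with
-- duplicate keys, which do not correspond to any Python dict input.
def Pre_level (file : List (String × List String)) (node : Int) (k : String) (diz : List (String × List String)) : Prop :=
  (file.map Prod.fst).Nodup ∧ (diz.map Prod.fst).Nodup ∧
  (∀ x ∈ pvReachFrom file [k], x ∈ file.map Prod.fst) ∧
  (∀ x ∈ pvReachFrom file [k], x ∉ pvReachFrom file (pvAdj file x))
instance (file : List (String × List String)) (node : Int) (k : String) (diz : List (String × List String)) : Decidable (Pre_level file node k diz) := by unfold Pre_level; infer_instance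

def pvWitness_level : (List (String × List String)) × Int × String × (List (String × List String)) :=
  ([("a", ["b", "b"]), ("b", [])], 0, "a", [("1", ["z"])])

def Spec_level (file : List (String × List String)) (node : Int) (k : String) (diz : List (String × List String)) (out : List (String × List String)) : Prop := out = level_alt file node k diz
instance (file : List (String × List String)) (node : Int) (k : String) (diz : List (String × List String)) (out : List (String × List String)) : Decidable (Spec_level file node k diz out) := by unfold Spec_level; infer_instance

-- ===== CLAIM (what is proved, stated in full; the proofs are below) =====
def Claim_equal_level : Prop := ∀ (file : List (String × List String)) (node : Int) (k : String) (diz : List (String × List String)), Dom_level file node k diz → Pre_level file node k diz → Spec_level file node k diz (level file node k diz)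

-- ===== LEMMAS AND PROOFS =====
-- (the agreement of the two ports is in fact proved for ALL inputs, see pv_final)

theorem pv_digitChar_toNat (n : Nat) (h : n < 10) : (Nat.digitChar n).toNat = 48 + n := by
  interval_cases n <;> rfl

theorem pv_decode_toDigits (n : Nat) : ∀ a : Nat,
    (Nat.toDigits 10 n).foldl (fun acc c => acc * 10 + (c.toNat - 48)) a
      = a * 10 ^ (Nat.toDigits 10 n).length + n := by
  induction n using Nat.strong_induction_on with
  | _ n ih =>
    intro a
    rw [Nat.toDigits_eq_if (by norm_num)]
    split_ifs with h
    · simp [List.foldl, pv_digitChar_toNat n h]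
    · have hlt : n / 10 < n := Nat.div_lt_self (by omega) (by norm_num)
      rw [List.foldl_append, ih _ hlt a]
      simp only [List.foldl, List.length_append, List.length_singleton]
      rw [pv_digitChar_toNat _ (Nat.mod_lt _ (by norm_num))]
      have := Nat.div_add_mod n 10
      rw [pow_succ]
      ring_nf
      omega

theorem pv_toDigits_inj {m n : Nat} (h : Nat.toDigits 10 m = Nat.toDigits 10 n) : m = n := by
  have h1 := pv_decode_toDigits m 0
  have h2 := pv_decode_toDigits n 0
  rw [h] at h1
  omega

theorem pv_toStr_inj {m n : Int} (h : PySem.Int.toStr m = PySem.Int.toStr n) : m = n := by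
  have h' : PySem.Int.toChars m = PySem.Int.toChars n := by
    rw [← PySem.Int.toList_toStr, ← PySem.Int.toList_toStr, h]
  unfold PySem.Int.toChars at h'
  split_ifs at h' with hm hn hn
  · simp only [List.cons.injEq, true_and] at h'
    have := pv_toDigits_inj h'
    omega
  · -- m < 0, 0 ≤ n : '-' :: _ = toDigits 10 n.toNat, impossible
    exfalso
    cases hd : Nat.toDigits 10 n.toNat with
    | nil => exact absurd hd (by have := @Nat.length_toDigits_pos 10 n.toNat; intro hh; simp [hh] at this)
    | cons c cs =>
      rw [hd] at h'
      have hc : c = '-' := by simp only [List.cons.injEq] at h'; exact h'.1.symm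
      have : c.isDigit = true := Nat.isDigit_of_mem_toDigits (by norm_num) (by norm_num) (hd ▸ List.mem_cons_self)
      simp [hc] at this
  · exfalso
    cases hd : Nat.toDigits 10 m.toNat with
    | nil => exact absurd hd (by have := @Nat.length_toDigits_pos 10 m.toNat; intro hh; simp [hh] at this)
    | cons c cs =>
      rw [hd] at h'
      have hc : c = '-' := by simp only [List.cons.injEq] at h'; exact h'.1
      have : c.isDigit = true := Nat.isDigit_of_mem_toDigits (by norm_num) (by norm_num) (hd ▸ List.mem_cons_self)
      simp [hc] at this
  · have := pv_toDigits_inj h'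
    omega

def pvMapK {ν : Type} (k : String) (v : ν) (p : String × ν) : String × ν :=
  if p.1 == k then (k, v) else p

theorem pv_keys_mapK {ν : Type} (l : List (String × ν)) (k : String) (v : ν) :
    (l.map (pvMapK k v)).map Prod.fst = l.map Prod.fst := by
  induction l with
  | nil => rfl
  | cons p t ih =>
    simp only [List.map_cons, ih, pvMapK]
    split_ifs with h
    · simp [(beq_iff_eq.mp h).symm]
    · rfl

theorem pv_contains_mapK {ν : Type} (l : List (String × ν)) (k k' : String) (v : ν) :
    (l.map (pvMapK k v)).any (·.1 == k') = l.any (·.1 == k') := by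
  have h1 : ∀ (m : List (String × ν)), m.any (·.1 == k') = (m.map Prod.fst).any (· == k') := by
    intro m; induction m with
    | nil => rfl
    | cons p t ih => simp [List.any_cons, ih]
  rw [h1, h1, pv_keys_mapK]

theorem pv_insert_insert_comm {ν : Type} (d : PySem.Dict String ν) (k1 k2 : String)
    (v1 v2 : ν) (hne : k1 ≠ k2) (hc : d.contains k1 = true) :
    (d.insert k2 v2).insert k1 v1 = (d.insert k1 v1).insert k2 v2 := by
  obtain ⟨l⟩ := d
  have hmapk : ∀ (v : ν) (p : String × ν), (fun p => if p.1 == k2 then (k2, v) else p) p = pvMapK k2 v p := fun _ _ => rfl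
  have hmapk1 : ∀ (v : ν) (p : String × ν), (fun p => if p.1 == k1 then (k1, v) else p) p = pvMapK k1 v p := fun _ _ => rfl
  have hc' : l.any (·.1 == k1) = true := hc
  have hb12 : (k1 == k2) = false := beq_eq_false_iff_ne.mpr hne
  have hb21 : (k2 == k1) = false := beq_eq_false_iff_ne.mpr (Ne.symm hne)
  by_cases h2 : l.any (·.1 == k2) = true
  · show PySem.Dict.insert _ _ _ = PySem.Dict.insert _ _ _
    simp only [PySem.Dict.insert, PySem.Dict.contains, funext (hmapk v2), funext (hmapk1 v1),
      pv_contains_mapK, hc', h2, if_pos]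
    congr 1
    simp only [List.map_map]
    apply List.map_congr_left
    intro p _
    simp only [Function.comp, pvMapK]
    split_ifs with ha hb hcx hdx <;> simp_all [pvMapK, beq_iff_eq]
  · rw [Bool.not_eq_true] at h2
    show PySem.Dict.insert _ _ _ = PySem.Dict.insert _ _ _
    simp only [PySem.Dict.insert, PySem.Dict.contains, funext (hmapk v2), funext (hmapk1 v1),
      hc', h2]
    simp only [Bool.false_eq_true, if_false, List.any_append, List.any_cons,
      List.any_nil, hc', hb21, Bool.or_false, pv_contains_mapK, h2,
      if_pos, List.map_append, List.map_cons, List.map_nil]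
    simp [pvMapK, hb21]

theorem pv_modify_modify_self {ν : Type} (d : PySem.Dict String ν) (k : String)
    (d0 d0' : ν) (f g : ν → ν) :
    (d.modify k d0 f).modify k d0' g = d.modify k d0 (fun v => g (f v)) := by
  show ((d.insert k _).insert k (g ((d.insert k (f (d.getD k d0))).getD k d0'))) = _
  rw [PySem.Dict.getD_insert_self, PySem.Dict.insert_insert_self]
  rfl

theorem pv_insert_modify_comm {ν : Type} (d : PySem.Dict String ν) (k1 k2 : String)
    (d1 v2 : ν) (f : ν → ν) (hne : k1 ≠ k2) (hc : d.contains k1 = true) :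
    (d.insert k2 v2).modify k1 d1 f = (d.modify k1 d1 f).insert k2 v2 := by
  show (d.insert k2 v2).insert k1 (f ((d.insert k2 v2).getD k1 d1)) = _
  rw [PySem.Dict.getD_insert_of_ne _ _ _ hne]
  exact pv_insert_insert_comm d k1 k2 _ v2 hne hc

theorem pv_modify_comm {ν : Type} (d : PySem.Dict String ν) (k1 k2 : String)
    (d1 d2 : ν) (f g : ν → ν) (hne : k1 ≠ k2) (hc : d.contains k1 = true) :
    (d.modify k2 d2 g).modify k1 d1 f = (d.modify k1 d1 f).modify k2 d2 g := by
  show (d.insert k2 _).modify k1 d1 f = (d.modify k1 d1 f).insert k2 (g ((d.modify k1 d1 f).getD k2 d2))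
  rw [pv_insert_modify_comm d k1 k2 d1 _ f hne hc]
  show _ = (d.modify k1 d1 f).insert k2 (g (((d.insert k1 _)).getD k2 d2))
  rw [PySem.Dict.getD_insert_of_ne _ _ _ (Ne.symm hne)]

theorem pv_foldlM_invariant {α σ : Type} (P : σ → Prop) (f : σ → α → Option σ)
    (hf : ∀ s a w, P s → f s a = some w → P w) :
    ∀ (l : List α) (s w : σ), P s → l.foldlM f s = some w → P w := by
  intro l
  induction l with
  | nil => intro s w hs h; simp only [List.foldlM_nil] at h; cases h; exact hs
  | cons a t ih =>
    intro s w hs h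
    simp only [List.foldlM_cons] at h
    cases hfa : f s a with
    | none => rw [hfa] at h; simp at h
    | some s' =>
      rw [hfa] at h
      simp only [Option.bind_eq_bind, Option.bind_some] at h
      exact ih s' w (hf s a s' hs hfa) h

theorem pv_levelGo_mono (file : PySem.Dict String (List String)) :
    ∀ (fuel : Nat) (d : Int) (c : String) (z w : PySem.Dict String (List String)) (key : String),
      z.contains key = true → levelGo file fuel d c z = some w → w.contains key = true := by
  intro fuel
  induction fuel with
  | zero => intro d c z w key _ h; simp [levelGo] at h
  | succ fuel ih =>
    intro d c z w key hz h
    rw [levelGo] at h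
    cases hget : file.get? c with
    | none => rw [hget] at h; simp at h
    | some cs =>
      rw [hget] at h
      simp only at h
      have h1 : (if z.contains (PySem.Int.toStr (d+1)) = false ∧ cs ≠ [] then z.insert (PySem.Int.toStr (d+1)) [] else z).contains key = true := by
        split_ifs with hcond
        · rw [PySem.Dict.contains_insert]; simp [hz]
        · exact hz
      refine pv_foldlM_invariant (fun s => s.contains key = true) _ ?_ cs _ w h1 h
      intro s a w' hs hw'
      refine ih (d+1) a _ w' key ?_ hw'
      rw [PySem.Dict.contains_modify]; simp [hs]


theorem pv_levelGo_comm (file : PySem.Dict String (List String)) :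
    ∀ (fuel : Nat) (d : Int) (c : String) (z : PySem.Dict String (List String))
      (key : String) (g : List String → List String),
      (∀ j : Int, d ≤ j → PySem.Int.toStr (j + 1) ≠ key) → z.contains key = true →
      levelGo file fuel d c (z.modify key [] g)
        = (levelGo file fuel d c z).map (fun w => w.modify key [] g) := by
  intro fuel
  induction fuel with
  | zero => intro d c z key g _ _; simp [levelGo]
  | succ fuel ih =>
    intro d c z key g hkeys hz
    rw [levelGo, levelGo]
    cases hget : file.get? c with
    | none => simp
    | some cs =>
      simp only
      have hne : PySem.Int.toStr (d + 1) ≠ key := hkeys d le_rfl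
      set nodo := PySem.Int.toStr (d + 1) with hnodo
      have hcont : (z.modify key [] g).contains nodo = z.contains nodo := by
        rw [PySem.Dict.contains_modify]
        simp [beq_eq_false_iff_ne.mpr hne]
      have hdiz1 : (if (z.modify key [] g).contains nodo = false ∧ cs ≠ [] then (z.modify key [] g).insert nodo [] else (z.modify key [] g))
          = (if z.contains nodo = false ∧ cs ≠ [] then z.insert nodo [] else z).modify key [] g := by
        rw [hcont]
        split_ifs with hcond
        · exact (pv_insert_modify_comm z key nodo [] [] g (Ne.symm hne) hz).symm
        · rfl
      rw [hdiz1]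
      have hd1 : (if z.contains nodo = false ∧ cs ≠ [] then z.insert nodo [] else z).contains key = true := by
        split_ifs with hcond
        · rw [PySem.Dict.contains_insert]; simp [hz]
        · exact hz
      -- inner fold commutes
      have aux : ∀ (t : List String) (u : PySem.Dict String (List String)), u.contains key = true →
          t.foldlM (fun w el => levelGo file fuel (d+1) el (w.modify nodo [] (· ++ [el]))) (u.modify key [] g)
            = (t.foldlM (fun w el => levelGo file fuel (d+1) el (w.modify nodo [] (· ++ [el]))) u).map (fun w => w.modify key [] g) := by
        intro t
        induction t with
        | nil => intro u hu; simp
        | cons el t iht =>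
          intro u hu
          simp only [List.foldlM_cons]
          rw [show (u.modify key [] g).modify nodo [] (· ++ [el])
                = (u.modify nodo [] (· ++ [el])).modify key [] g from
              (pv_modify_comm u key nodo [] [] g (· ++ [el]) (Ne.symm hne) hu).symm]
          rw [ih (d+1) el (u.modify nodo [] (· ++ [el])) key g
              (fun j hj => hkeys j (by omega))
              (by rw [PySem.Dict.contains_modify]; simp [hu])]
          cases hres : levelGo file fuel (d+1) el (u.modify nodo [] (· ++ [el])) with
          | none => simp
          | some w =>
            simp only [Option.map_some, Option.bind_eq_bind, Option.bind_some]
            exact iht w (pv_levelGo_mono file fuel (d+1) el _ w key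
              (by rw [PySem.Dict.contains_modify]; simp [hu]) hres)
      exact aux cs _ hd1

theorem pv_dfsFold_comm (file : PySem.Dict String (List String)) (fuel : Nat) (d : Int) :
    ∀ (L : List String) (u : PySem.Dict String (List String))
      (key : String) (g : List String → List String),
      (∀ j : Int, d ≤ j → PySem.Int.toStr (j + 1) ≠ key) → u.contains key = true →
      L.foldlM (fun z c => levelGo file fuel d c z) (u.modify key [] g)
        = (L.foldlM (fun z c => levelGo file fuel d c z) u).map (fun w => w.modify key [] g) := by
  intro L
  induction L with
  | nil => intro u key g _ _; simp
  | cons c t ih =>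
    intro u key g hkeys hu
    simp only [List.foldlM_cons]
    rw [pv_levelGo_comm file fuel d c u key g hkeys hu]
    cases hres : levelGo file fuel d c u with
    | none => simp
    | some w =>
      simp only [Option.map_some, Option.bind_eq_bind, Option.bind_some]
      exact ih w key g hkeys (pv_levelGo_mono file fuel d c u w key hu hres)

theorem pv_pull (file : PySem.Dict String (List String)) (fuel : Nat) (d : Int) :
    ∀ (cs : List String) (z : PySem.Dict String (List String)), cs ≠ [] →
      cs.foldlM (fun z el =>
          levelGo file fuel (d+1) el (z.modify (PySem.Int.toStr (d+1)) [] (· ++ [el]))) z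
        = cs.foldlM (fun z c => levelGo file fuel (d+1) c z)
            (z.modify (PySem.Int.toStr (d+1)) [] (· ++ cs)) := by
  intro cs
  induction cs with
  | nil => intro z h; exact absurd rfl h
  | cons el t ih =>
    intro z _
    simp only [List.foldlM_cons]
    cases ht : t with
    | nil => simp
    | cons e2 t2 =>
      rw [← ht]
      have htne : t ≠ [] := by rw [ht]; simp
      have hsplit : z.modify (PySem.Int.toStr (d+1)) [] (· ++ (el :: t))
          = (z.modify (PySem.Int.toStr (d+1)) [] (· ++ [el])).modify (PySem.Int.toStr (d+1)) [] (· ++ t) := by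
        rw [pv_modify_modify_self]
        congr 1
        funext v
        simp
      rw [hsplit]
      rw [pv_levelGo_comm file fuel (d+1) el (z.modify (PySem.Int.toStr (d+1)) [] (· ++ [el]))
            (PySem.Int.toStr (d+1)) (· ++ t)
            (fun j hj h => by
              have := pv_toStr_inj h; omega)
            (by rw [PySem.Dict.contains_modify]; simp)]
      cases hres : levelGo file fuel (d+1) el (z.modify (PySem.Int.toStr (d+1)) [] (· ++ [el])) with
      | none => simp
      | some w =>
        simp only [Option.map_some, Option.bind_eq_bind, Option.bind_some]
        exact ih w htne




theorem pv_gather_general (file : PySem.Dict String (List String)) :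
    ∀ (F : List String) (acc : List String),
      F.foldlM (fun acc x => (file.get? x).map (fun cs => acc ++ cs)) acc
        = (gatherNext file F).map (fun n => acc ++ n) := by
  intro F
  induction F with
  | nil => intro acc; simp [gatherNext]
  | cons x t ih =>
    intro acc
    simp only [gatherNext, List.foldlM_cons]
    cases hget : file.get? x with
    | none => simp
    | some cs =>
      simp only [Option.map_some, Option.bind_eq_bind, Option.bind_some, List.nil_append]
      rw [ih (acc ++ cs), ih cs]
      cases gatherNext file t <;> simp

theorem pv_step (file : PySem.Dict String (List String)) (fuel : Nat) (d : Int) :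
    ∀ (F : List String) (diz : PySem.Dict String (List String)),
      F.foldlM (fun z c => levelGo file (fuel+1) d c z) diz
        = match gatherNext file F with
          | none => none
          | some nxt => nxt.foldlM (fun z c => levelGo file fuel (d+1) c z)
              (bfsStep diz (PySem.Int.toStr (d+1)) nxt) := by
  intro F
  induction F with
  | nil => intro diz; simp [gatherNext, bfsStep]
  | cons c F' ihF =>
    intro diz
    set nodo := PySem.Int.toStr (d+1) with hnodo
    have hkeys : ∀ j : Int, d + 1 ≤ j → PySem.Int.toStr (j + 1) ≠ nodo := by
      intro j hj h; have := pv_toStr_inj h; omega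
    simp only [List.foldlM_cons]
    rw [show levelGo file (fuel+1) d c diz
        = match file.get? c with
          | none => none
          | some cs =>
            (if diz.contains nodo = false ∧ cs ≠ [] then diz.insert nodo [] else diz) |>
              (fun diz1 => cs.foldlM (fun z el =>
                levelGo file fuel (d+1) el (z.modify nodo [] (· ++ [el]))) diz1)
        from by rw [levelGo]]
    have hgatherc : gatherNext file (c :: F')
        = match file.get? c with
          | none => none
          | some cs => (gatherNext file F').map (fun n => cs ++ n) := by
      simp only [gatherNext, List.foldlM_cons]
      cases hget : file.get? c with
      | none => simp
      | some cs =>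
        simp only [Option.map_some, Option.bind_eq_bind, Option.bind_some, List.nil_append]
        exact pv_gather_general file F' cs
    rw [hgatherc]
    cases hget : file.get? c with
    | none => simp
    | some cs =>
      simp only
      cases hg : gatherNext file F' with
      | none =>
        -- every branch is none
        simp only [Option.map_none]
        have : ∀ (m : Option (PySem.Dict String (List String))),
            (m >>= fun r => F'.foldlM (fun z c => levelGo file (fuel+1) d c z) r) = none := by
          intro m
          cases m with
          | none => rfl
          | some r => simp only [Option.bind_eq_bind, Option.bind_some]; rw [ihF r, hg]
        exact this _
      | some nxt' =>
        simp only [Option.map_some]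
        by_cases hcs : cs = []
        · subst hcs
          simp only [ne_eq, not_true_eq_false, and_false, if_false, List.foldlM_nil,
            Option.pure_def, Option.bind_eq_bind, Option.bind_some, List.nil_append]
          rw [ihF diz, hg]
        · -- cs ≠ []
          have hsimpif : (if diz.contains nodo = false ∧ cs ≠ [] then diz.insert nodo [] else diz)
              = (if diz.contains nodo = false then diz.insert nodo [] else diz) := by
            simp [hcs]
          rw [hsimpif]
          set diz1 := if diz.contains nodo = false then diz.insert nodo [] else diz with hdiz1
          have hd1 : diz1.contains nodo = true := by
            rw [hdiz1]; split_ifs with h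
            · rw [PySem.Dict.contains_insert]; simp
            · simpa using h
          rw [pv_pull file fuel d cs diz1 hcs]
          set u := diz1.modify nodo [] (· ++ cs) with hu
          have hucont : u.contains nodo = true := by
            rw [hu, PySem.Dict.contains_modify]; simp
          -- rewrite the outer-bind body with ihF
          have hbody : ∀ (m : Option (PySem.Dict String (List String))),
              (m >>= fun r => F'.foldlM (fun z c => levelGo file (fuel+1) d c z) r)
                = (m >>= fun r => nxt'.foldlM (fun z c => levelGo file fuel (d+1) c z)
                    (bfsStep r nodo nxt')) := by
            intro m; cases m with
            | none => rfl
            | some r => simp only [Option.bind_eq_bind, Option.bind_some]; rw [ihF r, hg]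
          rw [hbody]
          by_cases hnxt : nxt' = []
          · subst hnxt
            simp only [bfsStep, ne_eq, not_true_eq_false, if_false, List.foldlM_nil,
              List.append_nil]
            show _ = cs.foldlM _ (bfsStep diz nodo cs)
            rw [show bfsStep diz nodo cs = u from by
              rw [bfsStep, if_pos hcs, hu, hdiz1]]
            cases hM : cs.foldlM (fun z c => levelGo file fuel (d+1) c z) u <;> simp
          · -- nxt' ≠ []
            show _ = (cs ++ nxt').foldlM _ (bfsStep diz nodo (cs ++ nxt'))
            have hbfs : bfsStep diz nodo (cs ++ nxt') = u.modify nodo [] (· ++ nxt') := by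
              rw [bfsStep, if_pos (by simp [hcs]), hu, hdiz1, pv_modify_modify_self]
              congr 1
              funext v
              simp
            rw [hbfs, List.foldlM_append,
              pv_dfsFold_comm file fuel (d+1) cs u nodo (· ++ nxt') hkeys hucont]
            cases hM : cs.foldlM (fun z c => levelGo file fuel (d+1) c z) u with
            | none => rfl
            | some r =>
              have hrcont : r.contains nodo = true :=
                pv_foldlM_invariant (fun s => s.contains nodo = true) _
                  (fun s a w hs hw => pv_levelGo_mono file fuel (d+1) a s w nodo hs hw)
                  cs u r hucont hM
              simp only [Option.map_some, Option.bind_eq_bind, Option.bind_some]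
              rw [show bfsStep r nodo nxt' = r.modify nodo [] (· ++ nxt') from by
                rw [bfsStep, if_pos hnxt, hrcont]; simp]

theorem pv_main (file : PySem.Dict String (List String)) :
    ∀ (fuel : Nat) (d : Int) (F : List String) (diz : PySem.Dict String (List String)),
      F.foldlM (fun z c => levelGo file fuel d c z) diz = bfsGo file fuel d F diz := by
  intro fuel
  induction fuel with
  | zero =>
    intro d F diz
    cases F with
    | nil => simp [bfsGo]
    | cons c t => simp [bfsGo, List.foldlM_cons, levelGo]
  | succ fuel ih =>
    intro d F diz
    cases F with
    | nil => simp [bfsGo]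
    | cons c t =>
      rw [pv_step file fuel d (c :: t) diz]
      rw [show bfsGo file (fuel+1) d (c :: t) diz
          = match gatherNext file (c :: t) with
            | none => none
            | some nxt => bfsGo file fuel (d+1) nxt (bfsStep diz (PySem.Int.toStr (d+1)) nxt)
          from by rw [bfsGo]; simp]
      cases gatherNext file (c :: t) with
      | none => rfl
      | some nxt => exact ih (d+1) nxt (bfsStep diz (PySem.Int.toStr (d+1)) nxt)

theorem pv_final (file : List (String × List String)) (node : Int) (k : String) (diz : List (String × List String)) :
    level file node k diz = level_alt file node k diz := by
  unfold level level_alt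
  have h := pv_main ⟨file⟩ (file.length + 2) node [k] ⟨diz⟩
  rw [← h]
  simp [List.foldlM_cons, List.foldlM_nil]

-- ===== VERDICT (by name: the statement is the Claim_ definition above) =====
theorem level_spec : Claim_equal_level := by
  intro file node k diz _ _
  exact pv_final file node k diz
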